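-- pv_equiv track=rewrite | github.com/JonatasFontele/neps.academy-problems-Python | 0054_billiards_cues.py | consult_cue
-- ===== SOURCE A (Python) =====
-- from collections import Counter
--
-- def consult_cue(stock_queries):
--     made = 0
--     # Creates a container with Counter({number: quantity})
--     count_queries = Counter(stock_queries)
--     # Creates a dictionary with {quantities_repeated: quantity}
--     count_amount = dict(Counter(count_queries.values()))
--     for key, value in dict(count_amount).items():
--         # quantities_repeated is odd. Ex.: 3 x 100 cm (4 made) + 3 x 80 cm (4 made) + 3 x 50 cm (4 made) = 12 cues made
--         if key % 2:
--             made += (key + 1) * value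
--         # quantities_repeated is even. Ex.: 2 x 100 cm (2 made) + 2 x 80 cm (2 made) + 2 x 50 cm (2 made) = 6 cues made
--         else:
--             made += key * value
--     return made
-- ===== SOURCE B (Python) =====
-- def consult_cue(stock_queries):
--     # Parity-toggle set: a length needs its count rounded up to even, i.e. one extra cue
--     # iff it occurs an odd number of times, so total = n + (# lengths with odd count).
--     odd = set()
--     for q in stock_queries:
--         if q in odd:
--             odd.remove(q)
--         else:
--             odd.add(q)
--     return len(stock_queries) + len(odd)
-- ===== Notes on version B (the rewrite author's own statement) =====
-- stated objective: alternative
-- what changed: B drops both Counters and the grouped parity arithmetic: it maintains a parity-toggle set (membership flipped per occurrence) in one pass and returns len(input) plus the size of that set, since each count rounded up to even adds 1 exactly when the count is odd.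
import Mathlib
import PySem

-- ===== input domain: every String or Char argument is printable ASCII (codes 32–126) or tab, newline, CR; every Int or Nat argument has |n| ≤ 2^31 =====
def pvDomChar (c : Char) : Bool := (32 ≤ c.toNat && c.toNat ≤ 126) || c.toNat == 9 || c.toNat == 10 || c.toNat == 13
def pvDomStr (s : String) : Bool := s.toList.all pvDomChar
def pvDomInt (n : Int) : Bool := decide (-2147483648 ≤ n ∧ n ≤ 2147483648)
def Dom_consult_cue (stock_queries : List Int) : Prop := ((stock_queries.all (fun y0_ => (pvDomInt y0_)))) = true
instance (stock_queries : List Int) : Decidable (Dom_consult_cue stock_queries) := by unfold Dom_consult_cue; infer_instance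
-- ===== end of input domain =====

-- B replaces A's two Counter passes and grouped parity loop by a single parity-toggle set:
-- total = len(input) + (# of values with odd multiplicity) (objective: alternative algorithm).


-- ===== PORT A =====
def consult_cue (stock_queries : List Int) : Int :=
  -- made = 0; count_queries = Counter(stock_queries)
  let count_queries := PySem.Dict.counter stock_queries
  -- count_amount = dict(Counter(count_queries.values()))
  let count_amount := PySem.Dict.counter count_queries.values
  -- for key, value in dict(count_amount).items(): if key % 2: made += (key+1)*value else: made += key*value
  count_amount.items.foldl
    (fun made kv =>
      if PySem.Int.mod kv.1 2 ≠ 0 then made + (kv.1 + 1) * kv.2 else made + kv.1 * kv.2)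
    0

-- ===== PORT B =====
-- loop body of B: if q in odd: odd.remove(q) else: odd.add(q)
def pvToggle (s : PySem.Set Int) (q : Int) : PySem.Set Int :=
  if PySem.Set.contains s q then (PySem.Set.remove? s q).getD s else PySem.Set.add s q

def consult_cue_alt (stock_queries : List Int) : Int :=
  -- odd = set(); for q in stock_queries: toggle q's membership
  let odd := stock_queries.foldl pvToggle PySem.Set.empty
  -- return len(stock_queries) + len(odd)
  (stock_queries.length : Int) + PySem.Set.len odd

-- ===== PRECONDITION & SPEC =====
def Spec_consult_cue (stock_queries : List Int) (out : Int) : Prop := out = consult_cue_alt stock_queries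
instance (stock_queries : List Int) (out : Int) : Decidable (Spec_consult_cue stock_queries out) := by unfold Spec_consult_cue; infer_instance

-- ===== CLAIM (what is proved, stated in full; the proofs are below) =====
def Claim_equal_consult_cue : Prop := ∀ (stock_queries : List Int), Dom_consult_cue stock_queries → Spec_consult_cue stock_queries (consult_cue stock_queries)

-- ===== LEMMAS AND PROOFS =====

-- Grouping by distinct values: summing f(k) * count(k) over the distinct keys equals summing f over the list.
theorem pv_group_sum (f : Int → Int) : ∀ (keys l : List Int), keys.Nodup → (∀ x ∈ l, x ∈ keys) →
    (keys.map (fun k => f k * l.count k)).sum = (l.map f).sum := by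
  intro keys
  induction keys with
  | nil =>
    intro l _ hsub
    have : l = [] := by
      cases l with
      | nil => rfl
      | cons a t => exact absurd (hsub a (List.mem_cons_self ..)) (List.not_mem_nil)
    simp [this]
  | cons k ks ih =>
    intro l hnd hsub
    have hperm : (l.filter (· == k) ++ l.filter (fun x => !(x == k))).Perm l :=
      List.filter_append_perm _ l
    have hsum : (l.map f).sum = ((l.filter (· == k)).map f).sum + ((l.filter (fun x => !(x == k))).map f).sum := by
      rw [← List.sum_append, ← List.map_append]
      exact (List.Perm.sum_eq (List.Perm.map f hperm)).symm
    have heq : l.filter (· == k) = List.replicate (l.count k) k := List.filter_beq k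
    have hcnt : ∀ k', k' ≠ k → (l.filter (fun x => !(x == k))).count k' = l.count k' := by
      intro k' hne
      rw [List.count_filter]
      simp [hne]
    have hsubs : ∀ x ∈ l.filter (fun x => !(x == k)), x ∈ ks := by
      intro x hx
      have hmem := List.mem_of_mem_filter hx
      have hxk : x ≠ k := by simpa using List.of_mem_filter hx
      rcases List.mem_cons.mp (hsub x hmem) with h | h
      · exact absurd h hxk
      · exact h
    have hih := ih (l.filter (fun x => !(x == k))) hnd.of_cons hsubs
    rw [List.map_cons, List.sum_cons, hsum, heq]
    have hmapcongr : (ks.map (fun k' => f k' * l.count k')) = (ks.map (fun k' => f k' * (l.filter (fun x => !(x == k))).count k')) := by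
      apply List.map_congr_left
      intro k' hk'
      have hne : k' ≠ k := fun h => (List.nodup_cons.mp hnd).1 (h ▸ hk')
      rw [hcnt k' hne]
    rw [hmapcongr, hih]
    simp [List.sum_replicate, mul_comm]

-- A's branch on key parity is the single expression (k + k % 2) * c.
theorem pv_branch_eq (k c : Int) :
    (if PySem.Int.mod k 2 ≠ 0 then (k + 1) * c else k * c) = (k + PySem.Int.mod k 2) * c := by
  rcases PySem.Int.mod_two_eq k with h | h <;> rw [h] <;> norm_num

-- Membership after one toggle step.
theorem pv_mem_toggle (s : PySem.Set Int) (_hnd : s.Nodup) (q x : Int) :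
    x ∈ pvToggle s q ↔ (if x = q then q ∉ s else x ∈ s) := by
  unfold pvToggle
  by_cases hq : q ∈ s
  · rw [if_pos (by simpa [PySem.Set.contains_iff] using hq),
      PySem.Set.remove?_of_mem hq]
    simp only [Option.getD_some, PySem.Set.mem_discard]
    by_cases hx : x = q <;> simp [hx, hq]
  · rw [if_neg (by simpa [PySem.Set.contains_iff] using hq), PySem.Set.mem_add]
    by_cases hx : x = q <;> simp [hx, hq]

-- Toggling keeps the set duplicate-free.
theorem pv_nodup_toggle (s : PySem.Set Int) (hnd : s.Nodup) (q : Int) :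
    (pvToggle s q).Nodup := by
  unfold pvToggle
  by_cases hq : q ∈ s
  · rw [if_pos (by simpa [PySem.Set.contains_iff] using hq),
      PySem.Set.remove?_of_mem hq]
    apply PySem.Set.nodup_discard
    exact hnd
  · rw [if_neg (by simpa [PySem.Set.contains_iff] using hq)]
    apply PySem.Set.nodup_add
    exact hnd

theorem pv_nodup_foldl_toggle : ∀ (l : List Int) (s : PySem.Set Int), s.Nodup →
    (l.foldl pvToggle s).Nodup := by
  intro l
  induction l with
  | nil => intro s h; exact h
  | cons q t ih => intro s h; exact ih _ (pv_nodup_toggle s h q)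

-- Invariant: after folding the toggle over l, x is in the set iff its membership in s
-- disagrees with the parity of its count in l.
theorem pv_mem_foldl_toggle : ∀ (l : List Int) (s : PySem.Set Int), s.Nodup → ∀ x,
    (x ∈ l.foldl pvToggle s ↔ (x ∈ s ↔ l.count x % 2 = 0)) := by
  intro l
  induction l with
  | nil => intro s _ x; simp
  | cons q t ih =>
    intro s hnd x
    have hstep : (q :: t).foldl pvToggle s = t.foldl pvToggle (pvToggle s q) := rfl
    rw [hstep, ih _ (pv_nodup_toggle s hnd q) x, pv_mem_toggle s hnd q x]
    by_cases hx : x = q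
    · subst hx
      rw [List.count_cons_self]
      by_cases hm : x ∈ s <;> simp [hm] <;> omega
    · have hqx : ¬ q = x := fun h => hx h.symm
      simp [hx, hqx]

-- Sum of an if-0-1 map is the length of the filter.
theorem pv_sum_parity : ∀ (D : List Int) (g : Int → Nat),
    (D.map (fun k => ((g k % 2 : Nat) : Int))).sum = ((D.filter (fun k => g k % 2 == 1)).length : Int) := by
  intro D g
  induction D with
  | nil => simp
  | cons k t ih =>
    simp only [List.map_cons, List.sum_cons, List.filter_cons, ih]
    by_cases h : g k % 2 = 1
    · simp [h]
      omega
    · have h0 : g k % 2 = 0 := by omega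
      simp [h0]

-- ===== VERDICT (by name: the statement is the Claim_ definition above) =====
theorem consult_cue_spec : Claim_equal_consult_cue := by
  intro l _
  unfold Spec_consult_cue consult_cue consult_cue_alt
  set vs := (PySem.Dict.counter l).values with hvs
  -- A's loop as a sum over its items
  have hA : ((PySem.Dict.counter vs).items.foldl
      (fun made kv => if PySem.Int.mod kv.1 2 ≠ 0 then made + (kv.1 + 1) * kv.2 else made + kv.1 * kv.2) 0)
      = ((PySem.Dict.counter vs).items.map
          (fun kv => if PySem.Int.mod kv.1 2 ≠ 0 then (kv.1 + 1) * kv.2 else kv.1 * kv.2)).sum := by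
    have hfun : (fun (made : Int) (kv : Int × Int) =>
        if PySem.Int.mod kv.1 2 ≠ 0 then made + (kv.1 + 1) * kv.2 else made + kv.1 * kv.2)
        = (fun made kv => made + (if PySem.Int.mod kv.1 2 ≠ 0 then (kv.1 + 1) * kv.2 else kv.1 * kv.2)) := by
      funext made kv; split <;> rfl
    rw [hfun, PySem.List.foldl_add]
    simp
  rw [hA, PySem.Dict.items_counter, List.map_map]
  have hmap : ((PySem.Set.ofList vs).map
      ((fun kv : Int × Int => if PySem.Int.mod kv.1 2 ≠ 0 then (kv.1 + 1) * kv.2 else kv.1 * kv.2) ∘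
        fun k => (k, (vs.count k : Int))))
      = ((PySem.Set.ofList vs).map (fun k => (k + PySem.Int.mod k 2) * (vs.count k : Int))) := by
    apply List.map_congr_left
    intro k _
    simpa using pv_branch_eq k (vs.count k : Int)
  rw [hmap]
  -- A = Σ_{x ∈ vs} (x + x % 2)
  have hAsum : ((PySem.Set.ofList vs).map (fun k => (k + PySem.Int.mod k 2) * (vs.count k : Int))).sum
      = (vs.map (fun v => v + PySem.Int.mod v 2)).sum :=
    pv_group_sum (fun v => v + PySem.Int.mod v 2) (PySem.Set.ofList vs) vs
      (PySem.Set.nodup_ofList vs) (fun x hx => (PySem.Set.mem_ofList vs x).mpr hx)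
  rw [hAsum]
  -- vs is the list of counts of the distinct elements of l
  have hvals : vs = (PySem.Set.ofList l).map (fun k => (l.count k : Int)) := by
    rw [hvs, PySem.Dict.values_eq_map_keys _ (by rw [PySem.Dict.keys_counter]; exact PySem.Set.nodup_ofList l) 0,
      PySem.Dict.keys_counter]
    apply List.map_congr_left
    intro k _
    exact PySem.Dict.getD_counter l k
  rw [hvals, List.map_map]
  have hsplit : ((PySem.Set.ofList l).map
      ((fun v => v + PySem.Int.mod v 2) ∘ fun k => (l.count k : Int))).sum
      = ((PySem.Set.ofList l).map (fun k => (l.count k : Int))).sum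
        + ((PySem.Set.ofList l).map (fun k => ((l.count k % 2 : Nat) : Int))).sum := by
    rw [← List.sum_map_add]
    apply congrArg List.sum
    apply List.map_congr_left
    intro k _
    simp
  rw [hsplit]
  -- sum of counts over the distinct elements = length
  have hlen : ((PySem.Set.ofList l).map (fun k => (l.count k : Int))).sum = (l.length : Int) := by
    have := pv_group_sum (fun _ => (1 : Int)) (PySem.Set.ofList l) l
      (PySem.Set.nodup_ofList l) (fun x hx => (PySem.Set.mem_ofList l x).mpr hx)
    simpa using this
  rw [hlen, pv_sum_parity]
  -- the parity filter and B's toggle set have the same members, both duplicate-free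
  have hperm : ((PySem.Set.ofList l).filter (fun k => l.count k % 2 == 1)).Perm
      (l.foldl pvToggle PySem.Set.empty) := by
    rw [List.perm_ext_iff_of_nodup
      ((PySem.Set.nodup_ofList l).filter _)
      (pv_nodup_foldl_toggle l PySem.Set.empty List.nodup_nil)]
    intro x
    rw [List.mem_filter, PySem.Set.mem_ofList,
      pv_mem_foldl_toggle l PySem.Set.empty List.nodup_nil x]
    constructor
    · intro ⟨_, h⟩
      simp only [beq_iff_eq] at h
      simp [PySem.Set.empty]; omega
    · intro h
      simp only [PySem.Set.empty, List.not_mem_nil, false_iff] at h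
      have h1 : l.count x % 2 = 1 := by omega
      have hpos : 0 < l.count x := by omega
      exact ⟨List.count_pos_iff.mp hpos, by simpa using h1⟩
  rw [hperm.length_eq]
  simp [PySem.Set.len]
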